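-- pv_equiv track=rewrite | github.com/wutong8023/eacg | utils/loraTrain/buildandloadData.py | optimize_sequences
-- ===== SOURCE A (Python) =====
-- from collections import deque
--
-- def optimize_sequences(inputids, block_size):
--     # 按照长度排序，从短到长排序
--     sorted_inputids = sorted(inputids, key=len)
--
--     optimized_inputids = []
--     input_deque = deque(sorted_inputids)
--
--     while input_deque:
--         # 取出最短的序列作为基础
--         current = input_deque.popleft()
--
--         if len(current) == block_size:
--             # 已经达到block_size，直接加入
--             optimized_inputids.append(current)
--             continue
--
--         # 创建一个新的列表来存储可能需要删除的索引
--         indices_to_remove = []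
--
--         for i in range(len(input_deque)):
--             if len(current) + len(input_deque[i]) <= block_size:
--                 # 合并序列
--                 current.extend(input_deque[i])
--                 indices_to_remove.append(i)
--
--         # 删除已经合并过的序列（逆序删除避免影响索引）
--         for index in reversed(indices_to_remove):
--             del input_deque[index]
--
--         # 添加到结果
--         optimized_inputids.append(current)
--
--     return optimized_inputids
-- ===== SOURCE B (Python) =====
-- def optimize_sequences(inputids, block_size):
--     # Single pass with an accumulator: after sorting by length the sequences A
--     # merges into a block are exactly the next consecutive items that still fit,
--     # so one for-loop carrying (out, current-open-block) suffices.
--     # A mutates the inner lists in place; B copies — equivalence is about the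
--     # return value.
--     out = []
--     cur = None
--     for seq in sorted(inputids, key=len):
--         if cur is None:
--             if len(seq) == block_size:
--                 out.append(list(seq))
--             else:
--                 cur = list(seq)
--         elif len(cur) + len(seq) <= block_size:
--             cur.extend(seq)
--         else:
--             out.append(cur)
--             if len(seq) == block_size:
--                 out.append(list(seq))
--                 cur = None
--             else:
--                 cur = list(seq)
--     if cur is not None:
--         out.append(cur)
--     return out
-- ===== Notes on version B (the rewrite author's own statement) =====
-- stated objective: simpler
-- what changed: A repeatedly rescans the whole remaining deque for fitting sequences and deletes them by index each round; B makes one left-to-right for-loop over the length-sorted list carrying an (output, open-block) accumulator, merging each item into the open block while it fits, since the items A merges are exactly the next consecutive ones that fit.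
import Mathlib
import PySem

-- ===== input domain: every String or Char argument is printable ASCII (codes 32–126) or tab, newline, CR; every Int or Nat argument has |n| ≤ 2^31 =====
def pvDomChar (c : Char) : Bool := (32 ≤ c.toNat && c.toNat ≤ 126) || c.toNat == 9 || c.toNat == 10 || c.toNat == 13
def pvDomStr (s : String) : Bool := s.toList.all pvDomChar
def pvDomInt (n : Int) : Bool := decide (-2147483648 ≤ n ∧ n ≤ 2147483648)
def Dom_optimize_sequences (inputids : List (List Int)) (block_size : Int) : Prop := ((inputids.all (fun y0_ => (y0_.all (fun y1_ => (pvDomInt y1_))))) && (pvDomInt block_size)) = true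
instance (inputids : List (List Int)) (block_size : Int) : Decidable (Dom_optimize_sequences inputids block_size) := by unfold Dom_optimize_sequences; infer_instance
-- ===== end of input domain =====

-- B replaces A's round-by-round rescans of the remaining deque (with index deletes) by a
-- single for-loop fold carrying an (output, open-block) accumulator (simpler); A mutates
-- the inner lists in place, B does not — the equivalence proved is about the return value.

-- ===== PORT A =====
-- A's inner `for i in range(len(input_deque))` with the later reversed deletion:
-- walk the deque in order, extending `cur` with each fitting item and keeping the rest.
def pvScanA (bs : Int) (cur : List Int) : List (List Int) → List Int × List (List Int)
  | [] => (cur, [])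
  | x :: xs =>
    if (cur.length : Int) + (x.length : Int) ≤ bs then pvScanA bs (cur ++ x) xs
    else
      let r := pvScanA bs cur xs
      (r.1, x :: r.2)

theorem pvScanA_snd_len (bs : Int) (cur : List Int) (xs : List (List Int)) :
    (pvScanA bs cur xs).2.length ≤ xs.length := by
  induction xs generalizing cur with
  | nil => simp [pvScanA]
  | cons x xs ih =>
    simp only [pvScanA]
    split
    · exact Nat.le_succ_of_le (ih _)
    · simpa using ih cur

-- A's outer `while input_deque:` loop.
def pvLoopA (bs : Int) : List (List Int) → List (List Int)
  | [] => []
  | c :: rest =>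
    if (c.length : Int) = bs then c :: pvLoopA bs rest
    else
      let r := pvScanA bs c rest
      r.1 :: pvLoopA bs r.2
termination_by l => l.length
decreasing_by
  all_goals simp only [List.length_cons]
  · omega
  · have := pvScanA_snd_len bs c rest; omega

def optimize_sequences (inputids : List (List Int)) (block_size : Int) : List (List Int) :=
  pvLoopA block_size (PySem.List.sorted inputids (fun l => l.length) false)

-- ===== PORT B =====
-- The body of B's for-loop: state = (reversed finished blocks, the open block or none).
def pvStepB (bs : Int) (st : List (List Int) × Option (List Int)) (seq : List Int) :
    List (List Int) × Option (List Int) :=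
  match st.2 with
  | none =>
    if (seq.length : Int) = bs then (seq :: st.1, none) else (st.1, some seq)
  | some cur =>
    if (cur.length : Int) + (seq.length : Int) ≤ bs then (st.1, some (cur ++ seq))
    else if (seq.length : Int) = bs then (seq :: cur :: st.1, none)
    else (cur :: st.1, some seq)

-- The final `if cur is not None: out.append(cur)` and the list built in reverse.
def pvFinishB (st : List (List Int) × Option (List Int)) : List (List Int) :=
  st.1.reverse ++ (match st.2 with | none => [] | some cur => [cur])

def optimize_sequences_alt (inputids : List (List Int)) (block_size : Int) : List (List Int) :=
  pvFinishB ((PySem.List.sorted inputids (fun l => l.length) false).foldl (pvStepB block_size) ([], none))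

-- ===== PRECONDITION & SPEC =====
def Spec_optimize_sequences (inputids : List (List Int)) (block_size : Int) (out : List (List Int)) : Prop := out = optimize_sequences_alt inputids block_size
instance (inputids : List (List Int)) (block_size : Int) (out : List (List Int)) : Decidable (Spec_optimize_sequences inputids block_size out) := by unfold Spec_optimize_sequences; infer_instance

-- ===== CLAIM (what is proved, stated in full; the proofs are below) =====
def Claim_equal_optimize_sequences : Prop := ∀ (inputids : List (List Int)) (block_size : Int), Dom_optimize_sequences inputids block_size → Spec_optimize_sequences inputids block_size (optimize_sequences inputids block_size)

-- ===== LEMMAS AND PROOFS =====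

-- Proof-only intermediate form: pop fitting items from the front of a sorted list.
def pvTakeMerge (bs : Int) (cur : List Int) : List (List Int) → List Int × List (List Int)
  | [] => (cur, [])
  | x :: xs =>
    if (cur.length : Int) + (x.length : Int) ≤ bs then pvTakeMerge bs (cur ++ x) xs
    else (cur, x :: xs)

theorem pvTakeMerge_snd_len (bs : Int) (cur : List Int) (xs : List (List Int)) :
    (pvTakeMerge bs cur xs).2.length ≤ xs.length := by
  induction xs generalizing cur with
  | nil => simp [pvTakeMerge]
  | cons x xs ih =>
    simp only [pvTakeMerge]
    split
    · exact Nat.le_succ_of_le (ih _)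
    · simp

def pvLoopM (bs : Int) : List (List Int) → List (List Int)
  | [] => []
  | c :: rest =>
    if (c.length : Int) = bs then c :: pvLoopM bs rest
    else
      let r := pvTakeMerge bs c rest
      r.1 :: pvLoopM bs r.2
termination_by l => l.length
decreasing_by
  all_goals simp only [List.length_cons]
  · omega
  · have := pvTakeMerge_snd_len bs c rest; omega

-- If nothing in xs fits, A's scan merges nothing and keeps xs intact.
theorem pvScanA_of_none (bs : Int) (cur : List Int) (xs : List (List Int))
    (h : ∀ y ∈ xs, ¬ ((cur.length : Int) + (y.length : Int) ≤ bs)) :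
    pvScanA bs cur xs = (cur, xs) := by
  induction xs with
  | nil => simp [pvScanA]
  | cons x xs ih =>
    simp only [pvScanA]
    rw [if_neg (h x (by simp))]
    rw [ih (fun y hy => h y (by simp [hy]))]

-- On a list with nondecreasing lengths, A's full rescan merges exactly the fitting prefix.
theorem pvScanA_eq_takeMerge (bs : Int) (cur : List Int) (xs : List (List Int))
    (h : xs.Pairwise (fun a b => a.length ≤ b.length)) :
    pvScanA bs cur xs = pvTakeMerge bs cur xs := by
  induction xs generalizing cur with
  | nil => rfl
  | cons x xs ih =>
    simp only [pvScanA, pvTakeMerge]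
    rcases List.pairwise_cons.mp h with ⟨hx, hxs⟩
    split
    · exact ih _ hxs
    · rename_i hfit
      rw [pvScanA_of_none bs cur xs (fun y hy => by have := hx y hy; omega)]

theorem pvTakeMerge_snd_sublist (bs : Int) (cur : List Int) (xs : List (List Int)) :
    (pvTakeMerge bs cur xs).2.Sublist xs := by
  induction xs generalizing cur with
  | nil => simp [pvTakeMerge]
  | cons x xs ih =>
    simp only [pvTakeMerge]
    split
    · exact (ih _).cons x
    · simp

theorem pvLoopA_eq_loopM (bs : Int) (xs : List (List Int))
    (h : xs.Pairwise (fun a b => a.length ≤ b.length)) :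
    pvLoopA bs xs = pvLoopM bs xs := by
  induction xs using pvLoopA.induct bs with
  | case1 => simp [pvLoopA, pvLoopM]
  | case2 c rest heq ih =>
    simp only [pvLoopA, pvLoopM, if_pos heq]
    rw [ih (List.pairwise_cons.mp h).2]
  | case3 c rest heq r ih =>
    rcases List.pairwise_cons.mp h with ⟨_, hrest⟩
    have hsc : pvScanA bs c rest = pvTakeMerge bs c rest := pvScanA_eq_takeMerge bs c rest hrest
    simp only [pvLoopA, pvLoopM, if_neg heq, hsc]
    have hsub : (pvTakeMerge bs c rest).2.Sublist rest := pvTakeMerge_snd_sublist bs c rest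
    have hp : List.Pairwise (fun a b => a.length ≤ b.length) (pvScanA bs c rest).2 := by
      rw [hsc]; exact hrest.sublist hsub
    have key : pvLoopA bs (pvScanA bs c rest).2 = pvLoopM bs (pvScanA bs c rest).2 := ih hp
    rw [hsc] at key
    rw [key]

-- B's fold, from either state, produces its pushed blocks followed by the pop-front loop's output.
theorem pvFoldB_eq_loopM (bs : Int) : ∀ (xs : List (List Int)),
    (∀ acc, pvFinishB (xs.foldl (pvStepB bs) (acc, none)) = acc.reverse ++ pvLoopM bs xs) ∧
    (∀ acc c, pvFinishB (xs.foldl (pvStepB bs) (acc, some c)) =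
      acc.reverse ++ ((pvTakeMerge bs c xs).1 :: pvLoopM bs (pvTakeMerge bs c xs).2)) := by
  intro xs
  induction xs with
  | nil =>
    constructor
    · intro acc; simp [pvFinishB, pvLoopM]
    · intro acc c; simp [pvFinishB, pvTakeMerge, pvLoopM]
  | cons x xs ih =>
    constructor
    · intro acc
      simp only [List.foldl_cons, pvStepB]
      by_cases hx : (x.length : Int) = bs
      · rw [if_pos hx]
        rw [ih.1 (x :: acc)]
        simp [pvLoopM, if_pos hx]
      · rw [if_neg hx]
        rw [ih.2 acc x]
        simp [pvLoopM, if_neg hx]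
    · intro acc c
      simp only [List.foldl_cons, pvStepB]
      by_cases hfit : (c.length : Int) + (x.length : Int) ≤ bs
      · rw [if_pos hfit]
        rw [ih.2 acc (c ++ x)]
        simp [pvTakeMerge, if_pos hfit]
      · rw [if_neg hfit]
        by_cases hx : (x.length : Int) = bs
        · rw [if_pos hx]
          rw [ih.1 (x :: c :: acc)]
          simp [pvTakeMerge, if_neg hfit, pvLoopM, if_pos hx]
        · rw [if_neg hx]
          rw [ih.2 (c :: acc) x]
          simp [pvTakeMerge, if_neg hfit, pvLoopM, if_neg hx]

-- ===== VERDICT (by name: the statement is the Claim_ definition above) =====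
theorem optimize_sequences_spec : Claim_equal_optimize_sequences := by
  intro inputids block_size _
  unfold Spec_optimize_sequences optimize_sequences optimize_sequences_alt
  rw [(pvFoldB_eq_loopM block_size _).1 []]
  simp only [List.reverse_nil, List.nil_append]
  exact pvLoopA_eq_loopM block_size _
    (PySem.List.sorted_pairwise inputids (fun l => l.length))
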